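-- pv_equiv track=rewrite | github.com/tekinmuhammed/LeetCode-Solves | Daily Challenges/Daily-Challenges-Oct-22-2024-solution.py | maxUniqueSplit
-- ===== SOURCE A (Python) =====
-- def maxUniqueSplit(s):
--     def backtrack(start, seen):
--         if start == len(s):
--             return len(seen)
--         max_split = 0
--         for end in range(start + 1, len(s) + 1):
--             substring = s[start:end]
--             if substring not in seen:
--                 seen.add(substring)
--                 max_split = max(max_split, backtrack(end, seen))
--                 seen.remove(substring)
--         return max_split
--     return backtrack(0, set())
-- ===== SOURCE B (Python) =====
-- def maxUniqueSplit(s):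
--     # Two-phase: generate ALL partitions of s (compositions), then filter the
--     # all-distinct ones and take the max part count. No pruning, no mutable seen set.
--     def comps(t):
--         if t == "":
--             return [[]]
--         res = []
--         for i in range(1, len(t) + 1):
--             for rest in comps(t[i:]):
--                 res.append([t[:i]] + rest)
--         return res
--     best = 0
--     for p in comps(s):
--         if len(set(p)) == len(p):
--             best = max(best, len(p))
--     return best
-- ===== Notes on version B (the rewrite author's own statement) =====
-- stated objective: alternative
-- what changed: Replaces A's recursive backtracking with a mutable seen set (add/undo and pruning) by a two-phase plan: generate the full list of all 2^(n-1) partitions of s, then filter the all-distinct ones and take the maximum part count.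
import Mathlib
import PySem

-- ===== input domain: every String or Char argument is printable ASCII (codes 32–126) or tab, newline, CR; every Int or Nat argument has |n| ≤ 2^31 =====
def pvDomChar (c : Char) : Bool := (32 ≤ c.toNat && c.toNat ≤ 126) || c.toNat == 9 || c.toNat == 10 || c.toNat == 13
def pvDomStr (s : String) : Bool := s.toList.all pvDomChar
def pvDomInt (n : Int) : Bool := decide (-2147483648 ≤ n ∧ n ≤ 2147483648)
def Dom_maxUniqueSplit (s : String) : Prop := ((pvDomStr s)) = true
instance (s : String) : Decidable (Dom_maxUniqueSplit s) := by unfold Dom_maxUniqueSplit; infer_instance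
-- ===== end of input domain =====

-- B replaces A's pruned backtracking (mutable seen set with undo) by a two-phase plan:
-- generate every partition of s, then filter the all-distinct ones and take the max part count.


-- ===== PORT A =====
-- backtrack(start, seen); its 'for end in range(start+1, len(s)+1)' loop is the foldl over
-- List.range' (start+1) (len-start), the same end values; max_split is the accumulator.
-- The slice s[start:end] (0 ≤ start ≤ end) is (drop start).take (end-start), exact by
-- PySem.List.slice_natCast; seen is a PySem.Set (List Char), 'not in' via ∈ (= Set.contains).
-- fuel only makes the recursion structural (recursion depth ≤ len+1); it changes no value.
def btkA (cs : List Char) (fuel : Nat) (start : Nat) (seen : PySem.Set (List Char)) : Nat :=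
  match fuel with
  | 0 => 0
  | fuel + 1 =>
    if start = cs.length then seen.length
    else
      (List.range' (start + 1) (cs.length - start)).foldl
        (fun acc e =>
          if (cs.drop start).take (e - start) ∈ seen then acc
          else max acc (btkA cs fuel e (PySem.Set.add seen ((cs.drop start).take (e - start))))) 0

def maxUniqueSplit (s : String) : Int :=
  Int.ofNat (btkA s.toList (s.toList.length + 1) 0 PySem.Set.empty)

-- ===== PORT B =====
-- comps(t) = every partition of t, built by the 'for i in range(1, len(t)+1)' loop
-- (foldl over List.range' 1 len, extending res); t[:i] / t[i:] are take i / drop i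
-- (exact by PySem.List.slice_to_natCast / slice_from_natCast).
-- fuel only makes the recursion structural (depth ≤ len+1); it changes no value.
def compsB (fuel : Nat) (cs : List Char) : List (List (List Char)) :=
  match fuel with
  | 0 => []
  | fuel + 1 =>
    if cs.isEmpty then [[]]
    else
      (List.range' 1 cs.length).foldl
        (fun res i => res ++ (compsB fuel (cs.drop i)).map (fun rest => cs.take i :: rest)) []

def maxUniqueSplit_alt (s : String) : Int :=
  Int.ofNat ((compsB (s.toList.length + 1) s.toList).foldl
    (fun best p => if (PySem.Set.ofList p).length = p.length then max best p.length else best) 0)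

-- ===== PRECONDITION & SPEC =====
def Spec_maxUniqueSplit (s : String) (out : Int) : Prop := out = maxUniqueSplit_alt s
instance (s : String) (out : Int) : Decidable (Spec_maxUniqueSplit s out) := by unfold Spec_maxUniqueSplit; infer_instance

-- ===== CLAIM (what is proved, stated in full; the proofs are below) =====
def Claim_equal_maxUniqueSplit : Prop := ∀ (s : String), Dom_maxUniqueSplit s → Spec_maxUniqueSplit s (maxUniqueSplit s)

-- ===== LEMMAS AND PROOFS =====

-- the B-side fold, generalized to an arbitrary seen set and accumulator
def Fld (seen : PySem.Set (List Char)) (acc : Nat) (ps : List (List (List Char))) : Nat :=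
  ps.foldl (fun b p => if p.Nodup ∧ ∀ x ∈ p, x ∉ seen then max b (seen.length + p.length) else b) acc

theorem Fld_cons (seen : PySem.Set (List Char)) (acc : Nat) (p : List (List Char))
    (ps : List (List (List Char))) :
    Fld seen acc (p :: ps) =
      Fld seen (if p.Nodup ∧ ∀ x ∈ p, x ∉ seen then max acc (seen.length + p.length) else acc) ps := rfl

theorem Fld_append (seen : PySem.Set (List Char)) (acc : Nat) (l₁ l₂ : List (List (List Char))) :
    Fld seen acc (l₁ ++ l₂) = Fld seen (Fld seen acc l₁) l₂ := by
  simp [Fld]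

theorem Fld_max (seen : PySem.Set (List Char)) (acc : Nat) (ps : List (List (List Char))) :
    Fld seen acc ps = max acc (Fld seen 0 ps) := by
  induction ps generalizing acc with
  | nil => simp [Fld]
  | cons p ps ih =>
      rw [Fld_cons, Fld_cons]
      split_ifs
      · rw [ih (max acc (seen.length + p.length)), ih (max 0 (seen.length + p.length))]
        omega
      · exact ih acc

theorem len_add_of_not_mem (seen : PySem.Set (List Char)) (sub : List Char) (hs : sub ∉ seen) :
    (PySem.Set.add seen sub).length = seen.length + 1 := by
  simp [PySem.Set.add, hs]

theorem cond_cons (seen : PySem.Set (List Char)) (sub : List Char) (p : List (List Char))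
    (hs : sub ∉ seen) :
    ((sub :: p).Nodup ∧ ∀ x ∈ sub :: p, x ∉ seen) ↔
      (p.Nodup ∧ ∀ x ∈ p, x ∉ PySem.Set.add seen sub) := by
  constructor
  · rintro ⟨hnd, hall⟩
    rcases List.nodup_cons.1 hnd with ⟨hsp, hpn⟩
    refine ⟨hpn, fun x hx hmem => ?_⟩
    rcases (PySem.Set.mem_add _ _ _).1 hmem with h | h
    · exact hall x (List.mem_cons_of_mem _ hx) h
    · exact hsp (h ▸ hx)
  · rintro ⟨hpn, hall⟩
    refine ⟨List.nodup_cons.2 ⟨fun hsp => hall sub hsp ((PySem.Set.mem_add _ _ _).2 (Or.inr rfl)), hpn⟩, ?_⟩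
    intro x hx
    rcases List.mem_cons.1 hx with rfl | hx
    · exact hs
    · exact fun hxs => hall x hx ((PySem.Set.mem_add _ _ _).2 (Or.inl hxs))

theorem Fld_map_cons (seen : PySem.Set (List Char)) (acc : Nat) (sub : List Char)
    (ps : List (List (List Char))) :
    Fld seen acc (ps.map (fun rest => sub :: rest)) =
      if sub ∈ seen then acc else max acc (Fld (PySem.Set.add seen sub) 0 ps) := by
  induction ps generalizing acc with
  | nil => split_ifs <;> simp [Fld]
  | cons p t ih =>
    by_cases hs : sub ∈ seen
    · rw [if_pos hs, List.map_cons, Fld_cons,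
        if_neg (fun hc => hc.2 sub (List.mem_cons_self) hs), ih, if_pos hs]
    · rw [if_neg hs, List.map_cons, Fld_cons, ih, if_neg hs, Fld_cons]
      have hc := cond_cons seen sub p hs
      have hlen := len_add_of_not_mem seen sub hs
      by_cases hp : p.Nodup ∧ ∀ x ∈ p, x ∉ PySem.Set.add seen sub
      · rw [if_pos (hc.mpr hp), if_pos hp, hlen,
          Fld_max (PySem.Set.add seen sub) (max 0 (seen.length + 1 + p.length))]
        simp only [List.length_cons]
        omega
      · rw [if_neg (fun h => hp (hc.mp h)), if_neg hp]

-- compsB is fuel-indifferent once fuel exceeds the length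
theorem compsB_congr (f₁ : Nat) : ∀ (cs : List Char) (f₂ : Nat),
    cs.length < f₁ → cs.length < f₂ → compsB f₁ cs = compsB f₂ cs := by
  induction f₁ with
  | zero => intro cs f₂ h; omega
  | succ f₁ ih =>
    intro cs f₂ h₁ h₂
    match f₂, h₂ with
    | f₂ + 1, h₂ =>
      by_cases he : cs.isEmpty = true
      · simp [compsB, he]
      · simp only [compsB, if_neg he]
        refine PySem.List.foldl_congr_mem' _ _ _ _ (fun i hi res => ?_)
        have hi' := List.mem_range'_1.1 hi
        have hlen : (cs.drop i).length = cs.length - i := List.length_drop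
        rw [ih (cs.drop i) f₂ (by omega) (by omega)]

-- main invariant: A's backtracking from 'start' equals B's filter-and-max over all
-- partitions of the suffix cs.drop start, relative to the current seen set
theorem btkA_eq (fuel : Nat) : ∀ (cs : List Char) (start : Nat) (seen : PySem.Set (List Char)),
    start ≤ cs.length → cs.length - start < fuel →
    btkA cs fuel start seen = Fld seen 0 (compsB (cs.length - start + 1) (cs.drop start)) := by
  induction fuel with
  | zero => intro cs start seen h1 h2; omega
  | succ f ih =>
    intro cs start seen hle hlt
    by_cases hse : start = cs.length
    · subst hse
      simp [btkA, List.drop_length, compsB, Fld]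
    · have hslt : start < cs.length := by omega
      have key : ∀ (ks : List Nat) (acc : Nat), (∀ k ∈ ks, k < cs.length - start) →
          List.foldl (fun acc k =>
              if (cs.drop start).take (start + 1 + k - start) ∈ seen then acc
              else max acc (btkA cs f (start + 1 + k)
                (PySem.Set.add seen ((cs.drop start).take (start + 1 + k - start))))) acc ks
          = Fld seen acc (ks.flatMap (fun k =>
              (compsB (cs.length - start) ((cs.drop start).drop (1 + k))).map
                (fun rest => (cs.drop start).take (1 + k) :: rest))) := by
        intro ks
        induction ks with
        | nil => intro acc _; rfl
        | cons k ks ihks =>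
          intro acc hb
          have hk : k < cs.length - start := hb k (List.mem_cons_self)
          simp only [List.foldl_cons, List.flatMap_cons, Fld_append]
          have hidx : start + 1 + k - start = 1 + k := by omega
          have hdd : (cs.drop start).drop (1 + k) = cs.drop (start + 1 + k) := by
            rw [List.drop_drop]; congr 1; omega
          have hstep : (if (cs.drop start).take (start + 1 + k - start) ∈ seen then acc
              else max acc (btkA cs f (start + 1 + k)
                (PySem.Set.add seen ((cs.drop start).take (start + 1 + k - start)))))
              = Fld seen acc ((compsB (cs.length - start) ((cs.drop start).drop (1 + k))).map
                  (fun rest => (cs.drop start).take (1 + k) :: rest)) := by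
            rw [Fld_map_cons, hidx, hdd,
              ih cs (start + 1 + k) (PySem.Set.add seen ((cs.drop start).take (1 + k)))
                (by omega) (by omega),
              compsB_congr (cs.length - (start + 1 + k) + 1) (cs.drop (start + 1 + k))
                (cs.length - start) (by rw [List.length_drop]; omega) (by rw [List.length_drop]; omega)]
          rw [hstep]
          exact ihks _ (fun j hj => hb j (List.mem_cons_of_mem _ hj))
      have hcond : ¬ ((cs.drop start).isEmpty = true) := by
        simp [List.isEmpty_iff, List.drop_eq_nil_iff]; omega
      have hr : (cs.drop start).length = cs.length - start := List.length_drop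
      simp only [btkA, if_neg hse, compsB, if_neg hcond, hr,
        List.range'_eq_map_range, List.foldl_map,
        PySem.List.foldl_append_eq_flatMap, List.nil_append]
      exact key (List.range (cs.length - start)) 0 (fun k hk => List.mem_range.1 hk)

theorem ofList_sublist (xs : List (List Char)) : (PySem.Set.ofList xs).Sublist xs := by
  induction xs using List.reverseRecOn with
  | nil => simp [PySem.Set.ofList_nil]
  | append_singleton xs x ih =>
    rw [PySem.Set.ofList_append_singleton, PySem.Set.add]
    split
    · exact ih.trans (List.sublist_append_left _ _)
    · exact List.Sublist.append ih (List.Sublist.refl _)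

theorem ofList_len_eq_iff (p : List (List Char)) :
    (PySem.Set.ofList p).length = p.length ↔ p.Nodup := by
  constructor
  · intro h
    have he := (ofList_sublist p).eq_of_length h
    rw [← he]
    exact PySem.Set.nodup_ofList p
  · intro h
    exact congrArg List.length (PySem.Set.ofList_eq_self_of_nodup p h)

-- ===== VERDICT (by name: the statement is the Claim_ definition above) =====
theorem maxUniqueSplit_spec : Claim_equal_maxUniqueSplit := by
  intro s _
  unfold Spec_maxUniqueSplit maxUniqueSplit maxUniqueSplit_alt
  congr 1
  have h := btkA_eq (s.toList.length + 1) s.toList 0 PySem.Set.empty (by omega) (by omega)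
  rw [List.drop_zero, Nat.sub_zero] at h
  rw [h]
  have hgen : ∀ (ps : List (List (List Char))) (a : Nat),
      Fld PySem.Set.empty a ps =
        ps.foldl (fun best p => if (PySem.Set.ofList p).length = p.length then max best p.length else best) a := by
    intro ps
    induction ps with
    | nil => intro a; rfl
    | cons p t ih =>
      intro a
      rw [Fld_cons, List.foldl_cons, ih]
      congr 1
      by_cases hp : p.Nodup
      · rw [if_pos ⟨hp, by simp [PySem.Set.empty]⟩, if_pos ((ofList_len_eq_iff p).2 hp)]
        simp [PySem.Set.empty]
      · rw [if_neg (fun hc => hp hc.1), if_neg (fun hc => hp ((ofList_len_eq_iff p).1 hc))]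
  exact hgen _ 0
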